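-- pv_equiv track=rewrite | github.com/leon-matthews/animal3 | animal3/utils/math.py | currency_series
-- ===== SOURCE A (Python) =====
-- from typing import Dict, Hashable, Iterable, Iterator, Optional, Sequence, Tuple, Union
--
-- def currency_series(
--     start: Optional[int] = None,
--     end: Optional[int] = None,
-- ) -> Iterator[int]:
--     """
--     Produces a readable series of numbers that is roughly exponential.
--
--         1, 2, 5, 10, 20, 50, 100, 200, etc.
--
--     Grows a little faster than a power of two series, reaching one million
--     after 19 iterations, rather than 20.
--
--     Args:
--         start:
--             Optionally start with a value equal or greater than given.
--         end:
--             Optionally end before value exceeds given.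
--
--     Returns:
--         A generator of ever increasing integers.
--     """
--     multiplier = 1
--     series = (1, 2, 5)
--     value: int
--     while True:
--         for s in series:
--             value = s * multiplier
--             if end is not None and value > end:
--                 return
--             if start is None or value >= start:
--                 yield value
--         multiplier *= 10
-- ===== SOURCE B (Python) =====
-- import itertools
--
--
-- def currency_series(start=None, end=None):
--     def count_le(x):
--         """How many terms of the series 1, 2, 5, 10, 20, 50, ... are <= x."""
--         if x < 1:
--             return 0
--         p, d = 1, 0
--         while 10 * p <= x:
--             p *= 10
--             d += 1
--         return 3 * d + 1 + (x >= 2 * p) + (x >= 5 * p)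
--
--     first = 0 if start is None else count_le(start - 1)
--     indices = itertools.count(first) if end is None else range(first, count_le(end))
--     for i in indices:
--         yield (1, 2, 5)[i % 3] * 10 ** (i // 3)
-- ===== Notes on version B (the rewrite author's own statement) =====
-- stated objective: alternative
-- what changed: Instead of enumerating every term and filtering with per-term guards, B computes the index bounds of the wanted terms in closed form (a decade-counting helper count_le gives how many terms are <= x), then emits the terms unconditionally over that index range.
import Mathlib
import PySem

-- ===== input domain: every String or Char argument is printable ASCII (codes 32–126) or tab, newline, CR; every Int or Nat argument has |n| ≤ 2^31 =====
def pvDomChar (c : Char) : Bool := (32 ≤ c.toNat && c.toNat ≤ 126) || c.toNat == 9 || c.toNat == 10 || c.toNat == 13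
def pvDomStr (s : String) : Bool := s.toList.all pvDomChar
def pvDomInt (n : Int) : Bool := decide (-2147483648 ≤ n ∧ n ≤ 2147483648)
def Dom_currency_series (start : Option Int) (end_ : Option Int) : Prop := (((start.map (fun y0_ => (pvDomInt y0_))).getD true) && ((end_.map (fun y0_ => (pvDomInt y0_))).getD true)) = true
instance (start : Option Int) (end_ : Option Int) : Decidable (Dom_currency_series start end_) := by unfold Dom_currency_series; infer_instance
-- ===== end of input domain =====

-- B computes the index bounds of the wanted terms in closed form (count_le counts terms <= x
-- by finding the decade), then emits terms unconditionally over that index range; A enumerates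
-- every term with per-term guards. Both Pythons are generators; the ports list the finite
-- series, so Pre_ requires end ≠ None (there both generators are infinite).

-- ===== PORT A =====
-- "start is None or value >= start"
def pyStartOk (start : Option Int) (v : Int) : Bool :=
  match start with
  | none => true
  | some s => decide (s ≤ v)

-- A's outer while True over series (1,2,5) with multiplier *= 10; early return when value > end.
-- multiplier is carried as a Nat with hypothesis 1 ≤ mult (always 10^k in Python) for termination.
def loopA (start : Option Int) (e : Int) (mult : Nat) (hm : 1 ≤ mult) : List Int :=
  if h1 : (1 * (mult : Int)) > e then []
  else
    (if pyStartOk start (1 * (mult : Int)) then [1 * (mult : Int)] else []) ++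
    if h2 : (2 * (mult : Int)) > e then []
    else
      (if pyStartOk start (2 * (mult : Int)) then [2 * (mult : Int)] else []) ++
      if h5 : (5 * (mult : Int)) > e then []
      else
        (if pyStartOk start (5 * (mult : Int)) then [5 * (mult : Int)] else []) ++
        loopA start e (mult * 10) (by omega)
termination_by (e + 1 - mult).toNat
decreasing_by
  push_cast at h1 ⊢
  omega

def currency_series (start : Option Int) (end_ : Option Int) : List Int :=
  match end_ with
  | none => []   -- the generator never terminates here; excluded by Pre_
  | some e => loopA start e 1 (le_refl 1)

-- ===== PORT B =====
-- (1, 2, 5)[i % 3] * 10 ** (i // 3)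
def valB (i : Nat) : Int :=
  (if i % 3 = 0 then 1 else if i % 3 = 1 then 2 else 5) * (10 : Int) ^ (i / 3)

-- the while loop of count_le: p *= 10 while 10*p <= x
def cntLoop (x : Int) (p : Nat) (d : Nat) (hp : 1 ≤ p) : Nat × Nat :=
  if h : ((10 * p : Nat) : Int) ≤ x then cntLoop x (10 * p) (d + 1) (by omega)
  else (p, d)
termination_by x.toNat + 1 - p
decreasing_by
  have : ((10 * p : Nat) : Int) ≤ (x.toNat : Int) := le_trans h (Int.self_le_toNat x)
  have : 10 * p ≤ x.toNat := by exact_mod_cast this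
  omega

-- count_le(x): number of series terms <= x
def countLe (x : Int) : Nat :=
  if x < 1 then 0
  else
    let pd := cntLoop x 1 0 (le_refl 1)
    3 * pd.2 + 1 + (if 2 * (pd.1 : Int) ≤ x then 1 else 0) + (if 5 * (pd.1 : Int) ≤ x then 1 else 0)

def currency_series_alt (start : Option Int) (end_ : Option Int) : List Int :=
  match end_ with
  | none => []   -- itertools.count: generator never terminates here; excluded by Pre_
  | some e =>
    let first := match start with
      | none => 0
      | some s => countLe (s - 1)
    (List.range' first (countLe e - first)).map valB

-- ===== PRECONDITION & SPEC =====
-- Pre_ excludes end=None: there the Python generators are infinite (enumerating them diverges),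
-- so no finite list value exists to claim.
def Pre_currency_series (_start : Option Int) (end_ : Option Int) : Prop := end_.isSome = true
instance (start : Option Int) (end_ : Option Int) : Decidable (Pre_currency_series start end_) := by unfold Pre_currency_series; infer_instance
def pvWitness_currency_series : Option Int × Option Int := (some 3, some 100)

def Spec_currency_series (start : Option Int) (end_ : Option Int) (out : List Int) : Prop := out = currency_series_alt start end_
instance (start : Option Int) (end_ : Option Int) (out : List Int) : Decidable (Spec_currency_series start end_ out) := by unfold Spec_currency_series; infer_instance

-- ===== CLAIM (what is proved, stated in full; the proofs are below) =====
def Claim_equal_currency_series : Prop := ∀ (start : Option Int) (end_ : Option Int), Dom_currency_series start end_ → Pre_currency_series start end_ → Spec_currency_series start end_ (currency_series start end_)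

-- ===== LEMMAS AND PROOFS =====

theorem valB_3k (k : Nat) : valB (3 * k) = 1 * (10 : Int) ^ k := by
  unfold valB
  have h1 : 3 * k % 3 = 0 := by omega
  have h2 : 3 * k / 3 = k := by omega
  simp [h1, h2]

theorem valB_3k1 (k : Nat) : valB (3 * k + 1) = 2 * (10 : Int) ^ k := by
  unfold valB
  have h1 : (3 * k + 1) % 3 = 1 := by omega
  have h2 : (3 * k + 1) / 3 = k := by omega
  simp [h1, h2]

theorem valB_3k2 (k : Nat) : valB (3 * k + 2) = 5 * (10 : Int) ^ k := by
  unfold valB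
  have h1 : (3 * k + 2) % 3 = 2 := by omega
  have h2 : (3 * k + 2) / 3 = k := by omega
  simp [h1, h2]

theorem valB_one_le (i : Nat) : 1 ≤ valB i := by
  unfold valB
  have hpow : (1 : Int) ≤ (10 : Int) ^ (i / 3) := one_le_pow₀ (by norm_num)
  split_ifs <;> nlinarith

theorem valB_strictMono : StrictMono valB := by
  apply strictMono_nat_of_lt_succ
  intro i
  have hm : i % 3 = 0 ∨ i % 3 = 1 ∨ i % 3 = 2 := by omega
  rcases hm with h | h | h
  · obtain ⟨k, hk⟩ : ∃ k, i = 3 * k := ⟨i / 3, by omega⟩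
    subst hk
    have hp : (0 : Int) < (10 : Int) ^ k := by positivity
    rw [valB_3k, valB_3k1]; nlinarith
  · obtain ⟨k, hk⟩ : ∃ k, i = 3 * k + 1 := ⟨i / 3, by omega⟩
    subst hk
    have hp : (0 : Int) < (10 : Int) ^ k := by positivity
    rw [valB_3k1, valB_3k2]; nlinarith
  · obtain ⟨k, hk⟩ : ∃ k, i = 3 * k + 2 := ⟨i / 3, by omega⟩
    subst hk
    have hp : (0 : Int) < (10 : Int) ^ k := by positivity
    have h3 : 3 * k + 2 + 1 = 3 * (k + 1) := by ring
    rw [valB_3k2, h3, valB_3k, pow_succ]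
    nlinarith

-- cntLoop returns (10^D, D) with 10^D ≤ x < 10^(D+1)
theorem cntLoop_spec (x : Int) :
    ∀ n p d (hp : 1 ≤ p), x.toNat + 1 - p ≤ n → p = 10 ^ d → ((p : Nat) : Int) ≤ x →
      ∃ D, cntLoop x p d hp = (10 ^ D, D) ∧ d ≤ D ∧
        ((10 ^ D : Nat) : Int) ≤ x ∧ x < ((10 ^ (D + 1) : Nat) : Int) := by
  intro n
  induction n with
  | zero =>
    intro p d hp hn hpd hpx
    have h1 : ((p : Nat) : Int) ≤ (x.toNat : Int) := le_trans hpx (Int.self_le_toNat x)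
    have h2 : p ≤ x.toNat := by exact_mod_cast h1
    omega
  | succ n ih =>
    intro p d hp hn hpd hpx
    rw [cntLoop]
    split_ifs with h
    · have h1 : ((10 * p : Nat) : Int) ≤ (x.toNat : Int) := le_trans h (Int.self_le_toNat x)
      have h2 : 10 * p ≤ x.toNat := by exact_mod_cast h1
      exact (ih (10 * p) (d + 1) (by omega) (by omega)
        (by rw [hpd, pow_succ]; ring) h).imp (fun D hD => ⟨hD.1, by omega, hD.2.2⟩)
    · refine ⟨d, by rw [hpd], le_refl d, by rw [← hpd]; exact hpx, ?_⟩
      have hx2 : x < ((10 * p : Nat) : Int) := by omega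
      have hpp : 10 * p = 10 ^ (d + 1) := by rw [hpd, pow_succ]; ring
      rw [← hpp]
      exact hx2

-- the key characterisation: term i is ≤ x iff i < countLe x
theorem countLe_iff (x : Int) (i : Nat) : valB i ≤ x ↔ i < countLe x := by
  unfold countLe
  split_ifs with hx
  · simp only [Nat.not_lt_zero, iff_false, not_le]
    have := valB_one_le i
    omega
  · push_neg at hx
    obtain ⟨D, hcl, -, hle, hlt⟩ :=
      cntLoop_spec x (x.toNat + 1) 1 0 (le_refl 1) (by omega) (by norm_num)
        (by exact_mod_cast hx)
    rw [hcl]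
    simp only
    have hpows : ((10 ^ D : Nat) : Int) = (10 : Int) ^ D := by push_cast; ring
    have hpows1 : ((10 ^ (D + 1) : Nat) : Int) = (10 : Int) ^ (D + 1) := by push_cast; ring
    rw [hpows] at hle
    rw [hpows1] at hlt
    simp only [hpows]
    -- N and the sandwich valB (N-1) ≤ x < valB N
    set N := 3 * D + 1 + (if 2 * (10 : Int) ^ D ≤ x then 1 else 0) +
      (if 5 * (10 : Int) ^ D ≤ x then 1 else 0) with hN
    have hpow : (0 : Int) < (10 : Int) ^ D := by positivity
    have h52 : 5 * (10 : Int) ^ D ≤ x → 2 * (10 : Int) ^ D ≤ x := by intro h; nlinarith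
    have hsand : valB (N - 1) ≤ x ∧ x < valB N := by
      by_cases h5 : 5 * (10 : Int) ^ D ≤ x
      · have h2 := h52 h5
        have : N = 3 * D + 3 := by rw [hN]; simp [h2, h5]
        rw [this]
        have e1 : 3 * D + 3 - 1 = 3 * D + 2 := by omega
        have e2 : 3 * D + 3 = 3 * (D + 1) := by ring
        rw [e1, valB_3k2, e2, valB_3k, pow_succ]
        constructor
        · exact h5
        · nlinarith [hlt, pow_succ (10:Int) D]
      · by_cases h2 : 2 * (10 : Int) ^ D ≤ x
        · have : N = 3 * D + 2 := by rw [hN]; simp [h2, h5]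
          rw [this]
          have e1 : 3 * D + 2 - 1 = 3 * D + 1 := by omega
          rw [e1, valB_3k1, valB_3k2]
          exact ⟨h2, by omega⟩
        · have : N = 3 * D + 1 := by rw [hN]; simp [h2, h5]
          rw [this]
          have e1 : 3 * D + 1 - 1 = 3 * D := by omega
          rw [e1, valB_3k, valB_3k1]
          exact ⟨by omega, by omega⟩
    constructor
    · intro hvi
      by_contra hni
      push_neg at hni
      have := valB_strictMono.monotone hni
      omega
    · intro hiN
      have h1 : i ≤ N - 1 := by omega
      have := valB_strictMono.monotone h1
      omega

-- firstIdx: B's "first"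
def firstIdx (start : Option Int) : Nat :=
  match start with
  | none => 0
  | some s => countLe (s - 1)

theorem pyStartOk_iff (start : Option Int) (j : Nat) :
    pyStartOk start (valB j) = true ↔ firstIdx start ≤ j := by
  cases start with
  | none => simp [pyStartOk, firstIdx]
  | some s =>
    simp only [pyStartOk, firstIdx, decide_eq_true_eq]
    have h := countLe_iff (s - 1) j
    constructor
    · intro hle
      by_contra hc
      push_neg at hc
      have := h.mpr hc
      omega
    · intro hge
      by_contra hc
      push_neg at hc
      have : valB j ≤ s - 1 := by omega
      have := h.mp this
      omega

-- the guarded index loop, a step ladder between A and B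
def loopB (start : Option Int) (e : Int) (i : Nat) : List Int :=
  if _h : valB i > e then []
  else (if pyStartOk start (valB i) then [valB i] else []) ++ loopB start e (i + 1)
termination_by (3 * e.toNat + 3 - i)
decreasing_by
  have h1 : (i / 3) < 10 ^ (i / 3) := Nat.lt_pow_self (by norm_num)
  have h2 : ((i / 3 : Nat) : Int) + 1 ≤ valB i := by
    unfold valB
    have hpos : (0 : Int) < (10 : Int) ^ (i / 3) := by positivity
    have h3 : ((i / 3 : Nat) : Int) + 1 ≤ (10 : Int) ^ (i / 3) := by
      have : ((10 : Int)) ^ (i / 3) = ((10 ^ (i / 3) : Nat) : Int) := by push_cast; ring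
      rw [this]; exact_mod_cast h1
    split_ifs <;> nlinarith
  have h4 : e ≤ (e.toNat : Int) := Int.self_le_toNat e
  omega

theorem pow_cast (k : Nat) : ((10 ^ k : Nat) : Int) = (10 : Int) ^ k := by push_cast; ring

-- loopA only depends on the multiplier value, not on the 1 ≤ mult proof
theorem loopA_congr (start : Option Int) (e : Int) {m1 m2 : Nat} (h1 : 1 ≤ m1) (h2 : 1 ≤ m2)
    (hm : m1 = m2) : loopA start e m1 h1 = loopA start e m2 h2 := by subst hm; rfl

-- bridge 1: A's loop at multiplier 10^k equals the guarded index loop at index 3k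
theorem loopA_eq_loopB (start : Option Int) (e : Int) :
    ∀ N k (h : 1 ≤ 10 ^ k), e.toNat + 1 ≤ 10 ^ k + N →
      loopA start e (10 ^ k) h = loopB start e (3 * k) := by
  intro N
  induction N with
  | zero =>
    intro k h hk
    have hc : ((10 ^ k : Nat) : Int) = (10 : Int) ^ k := pow_cast k
    have hgt : (1 : Int) * ((10 ^ k : Nat) : Int) > e := by
      rw [one_mul, hc]
      have h1 : (e.toNat : Int) + 1 ≤ ((10 ^ k : Nat) : Int) := by exact_mod_cast hk
      rw [hc] at h1
      have h2 : e ≤ (e.toNat : Int) := Int.self_le_toNat e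
      omega
    rw [loopA, loopB, dif_pos hgt, dif_pos (by rw [valB_3k, ← pow_cast]; exact hgt)]
  | succ N ih =>
    intro k h hk
    rw [loopA, loopB]
    simp only [valB_3k, pow_cast, dite_eq_ite]
    by_cases hc1 : (1 : Int) * (10 : Int) ^ k > e
    · simp only [if_pos hc1]
    · simp only [if_neg hc1]
      congr 1
      rw [loopB]
      simp only [valB_3k1, dite_eq_ite]
      by_cases hc2 : (2 : Int) * (10 : Int) ^ k > e
      · simp only [if_pos hc2]
      · simp only [if_neg hc2]
        congr 1
        rw [loopB]
        simp only [valB_3k2, dite_eq_ite]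
        by_cases hc5 : (5 : Int) * (10 : Int) ^ k > e
        · simp only [if_pos hc5]
        · simp only [if_neg hc5]
          congr 1
          have hk1 : e.toNat + 1 ≤ 10 ^ (k + 1) + N := by
            have hs : (10 : Nat) ^ (k + 1) = 10 ^ k * 10 := pow_succ 10 k
            omega
          have h1 : (1 : Nat) ≤ 10 ^ (k + 1) := Nat.one_le_pow _ _ (by norm_num)
          have hmain := ih (k + 1) h1 hk1
          have h3 : 3 * k + 1 + 1 + 1 = 3 * (k + 1) := by ring
          rw [h3]
          exact (loopA_congr start e _ h1 ((pow_succ 10 k).symm)).trans hmain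

-- bridge 2: the guarded index loop equals B's unconditional range map
theorem loopB_eq_range (start : Option Int) (e : Int) :
    ∀ n i, countLe e ≤ i + n →
      loopB start e i =
        (List.range' (max i (firstIdx start)) (countLe e - max i (firstIdx start))).map valB := by
  intro n
  induction n with
  | zero =>
    intro i hn
    have hge : countLe e ≤ i := by omega
    have hgt : valB i > e := by
      by_contra hc
      push_neg at hc
      have := (countLe_iff e i).mp hc
      omega
    rw [loopB, dif_pos hgt]
    have : countLe e - max i (firstIdx start) = 0 := by omega
    rw [this]
    simp
  | succ n ih =>
    intro i hn
    by_cases hi : countLe e ≤ i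
    · have hgt : valB i > e := by
        by_contra hc
        push_neg at hc
        have := (countLe_iff e i).mp hc
        omega
      rw [loopB, dif_pos hgt]
      have : countLe e - max i (firstIdx start) = 0 := by omega
      rw [this]
      simp
    · push_neg at hi
      have hle : ¬ valB i > e := by
        push_neg
        exact (countLe_iff e i).mpr hi
      rw [loopB, dif_neg hle]
      rw [ih (i + 1) (by omega)]
      by_cases hf : firstIdx start ≤ i
      · have hok : pyStartOk start (valB i) = true := (pyStartOk_iff start i).mpr hf
        rw [hok]
        have e1 : max i (firstIdx start) = i := by omega
        have e2 : max (i + 1) (firstIdx start) = i + 1 := by omega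
        rw [e1, e2]
        have e3 : countLe e - i = (countLe e - (i + 1)) + 1 := by omega
        rw [e3, List.range'_succ]
        simp
      · push_neg at hf
        have hok : ¬ pyStartOk start (valB i) = true := by
          rw [pyStartOk_iff]
          omega
        simp only [Bool.not_eq_true] at hok
        rw [hok]
        have e1 : max i (firstIdx start) = firstIdx start := by omega
        have e2 : max (i + 1) (firstIdx start) = firstIdx start := by omega
        rw [e1, e2]
        simp

-- ===== VERDICT (by name: the statement is the Claim_ definition above) =====
theorem currency_series_spec : Claim_equal_currency_series := by
  intro start end_ _ hpre
  unfold Spec_currency_series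
  match end_ with
  | none => exact absurd hpre (by simp [Pre_currency_series])
  | some e =>
    show loopA start e 1 _ = currency_series_alt start (some e)
    have hA := loopA_eq_loopB start e (e.toNat + 1) 0 (by norm_num) (by simp)
    simp only [pow_zero, Nat.mul_zero] at hA
    have hA' : loopA start e 1 (le_refl 1) = loopB start e 0 := hA
    rw [hA', loopB_eq_range start e (countLe e) 0 (by omega)]
    simp only [Nat.zero_max]
    rfl
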